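-- pv_equiv track=rewrite | github.com/DmitriyPyanzin/python_specialisation | lesson6/hw/task3.py | unique_el
-- ===== SOURCE A (Python) =====
-- def unique_el(lst1: list, lst2: list) -> list:
--     res = []
--     new_lst1 = [el for el in lst1 if lst1.count(el) == 1]
--     new_lst2 = [el for el in lst2 if lst2.count(el) == 1]
--     for el in new_lst1:
--         if el not in new_lst2:
--             res.append(el)
--         else:
--             new_lst2.remove(el)
--     res += new_lst2
--     return res
-- ===== SOURCE B (Python) =====
-- def unique_el(lst1: list, lst2: list) -> list:
--     c1 = {}
--     for el in lst1:
--         c1[el] = c1.get(el, 0) + 1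
--     c2 = {}
--     for el in lst2:
--         c2[el] = c2.get(el, 0) + 1
--     u1 = {el for el in lst1 if c1[el] == 1}
--     u2 = {el for el in lst2 if c2[el] == 1}
--     return [el for el in lst1 if c1[el] == 1 and el not in u2] + \
--            [el for el in lst2 if c2[el] == 1 and el not in u1]
-- ===== Notes on version B (the rewrite author's own statement) =====
-- stated objective: faster
-- what changed: Replaces A's repeated lst.count scans and the append-or-remove mutation loop over pre-filtered copies by one counting pass per list plus two independent set-difference filters over the original lists.
import Mathlib
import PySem

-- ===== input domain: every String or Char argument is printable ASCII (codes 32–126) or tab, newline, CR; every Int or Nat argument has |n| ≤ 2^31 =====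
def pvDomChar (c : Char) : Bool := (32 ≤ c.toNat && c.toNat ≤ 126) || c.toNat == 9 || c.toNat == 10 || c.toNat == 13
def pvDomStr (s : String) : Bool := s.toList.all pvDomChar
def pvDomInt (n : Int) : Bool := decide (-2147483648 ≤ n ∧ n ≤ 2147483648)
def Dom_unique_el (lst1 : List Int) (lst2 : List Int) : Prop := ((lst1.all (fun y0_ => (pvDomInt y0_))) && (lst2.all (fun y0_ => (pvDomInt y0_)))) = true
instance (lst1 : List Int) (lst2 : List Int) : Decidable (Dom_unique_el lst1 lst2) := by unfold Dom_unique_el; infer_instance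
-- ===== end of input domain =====

-- B replaces A's quadratic repeated-count scans and append-or-remove mutation loop by
-- one counting pass per list plus two independent set-difference filters (objective: faster).

-- ===== PORT A =====
def unique_el (lst1 : List Int) (lst2 : List Int) : List Int :=
  let new_lst1 := lst1.filter (fun el => PySem.List.count lst1 el == 1)
  let new_lst2 := lst2.filter (fun el => PySem.List.count lst2 el == 1)
  -- for el in new_lst1: append to res, or remove from new_lst2
  let st := new_lst1.foldl (fun (st : List Int × List Int) el =>
      if !(st.2.contains el) then (st.1 ++ [el], st.2)
      -- in the else branch el ∈ st.2, so remove? is some; getD is the total form of list.remove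
      else (st.1, (PySem.List.remove? st.2 el).getD st.2)) ([], new_lst2)
  st.1 ++ st.2

-- ===== PORT B =====
def unique_el_alt (lst1 : List Int) (lst2 : List Int) : List Int :=
  let c1 := lst1.foldl (fun d el => d.insert el (d.getD el 0 + 1)) (PySem.Dict.empty : PySem.Dict Int Int)
  let c2 := lst2.foldl (fun d el => d.insert el (d.getD el 0 + 1)) (PySem.Dict.empty : PySem.Dict Int Int)
  -- c1[el] is always present for el ∈ lst1; getD is the total form of the lookup
  let u1 : PySem.Set Int := PySem.Set.ofList (lst1.filter (fun el => c1.getD el 0 == 1))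
  let u2 : PySem.Set Int := PySem.Set.ofList (lst2.filter (fun el => c2.getD el 0 == 1))
  lst1.filter (fun el => c1.getD el 0 == 1 && !(PySem.Set.contains u2 el))
    ++ lst2.filter (fun el => c2.getD el 0 == 1 && !(PySem.Set.contains u1 el))

-- ===== PRECONDITION & SPEC =====
def Spec_unique_el (lst1 : List Int) (lst2 : List Int) (out : List Int) : Prop := out = unique_el_alt lst1 lst2
instance (lst1 : List Int) (lst2 : List Int) (out : List Int) : Decidable (Spec_unique_el lst1 lst2 out) := by unfold Spec_unique_el; infer_instance

-- ===== CLAIM (what is proved, stated in full; the proofs are below) =====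
def Claim_equal_unique_el : Prop := ∀ (lst1 : List Int) (lst2 : List Int), Dom_unique_el lst1 lst2 → Spec_unique_el lst1 lst2 (unique_el lst1 lst2)

-- ===== LEMMAS AND PROOFS =====

-- the singly-occurring sublist is duplicate-free
theorem pv_nodup_once (lst : List Int) :
    (lst.filter (fun el => PySem.List.count lst el == 1)).Nodup := by
  rw [List.nodup_iff_count_le_one]
  intro a
  by_cases h : (PySem.List.count lst a == 1) = true
  · have hle := List.Sublist.count_le a
      (List.filter_sublist (p := fun el => PySem.List.count lst el == 1) (l := lst))
    simp only [PySem.List.count_eq, beq_iff_eq] at h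
    omega
  · have : a ∉ lst.filter (fun el => PySem.List.count lst el == 1) := by
      intro hmem
      exact h ((List.mem_filter.mp hmem).2)
    rw [List.count_eq_zero.mpr this]
    omega

-- A's loop over a duplicate-free list, removing from a duplicate-free list,
-- computes the two order-preserving set differences
theorem pv_foldA (l : List Int) :
    ∀ (m res : List Int), l.Nodup → m.Nodup →
    l.foldl (fun (st : List Int × List Int) el =>
        if !(st.2.contains el) then (st.1 ++ [el], st.2)
        else (st.1, (PySem.List.remove? st.2 el).getD st.2)) (res, m)
      = (res ++ l.filter (fun e => !(m.contains e)),
         m.filter (fun e => !(l.contains e))) := by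
  induction l with
  | nil => intro m res _ _; simp
  | cons a t ih =>
    intro m res hl hm
    have hat : a ∉ t := (List.nodup_cons.mp hl).1
    have ht : t.Nodup := (List.nodup_cons.mp hl).2
    by_cases hma : a ∈ m
    · have hc : m.contains a = true := by simpa [List.contains_eq_mem] using hma
      have hrem := PySem.List.remove?_eq_some_erase m a hma
      rw [List.foldl_cons]
      simp only [hc, Bool.not_true, Bool.false_eq_true, if_false, hrem, Option.getD_some]
      rw [ih (m.erase a) res ht (hm.erase a)]
      simp only [Prod.mk.injEq]
      refine ⟨?_, ?_⟩
      · rw [List.filter_cons]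
        simp only [hc, Bool.not_true, Bool.false_eq_true, if_false]
        congr 1
        apply List.filter_congr
        intro e he
        have hea : e ≠ a := fun h => hat (h ▸ he)
        have hmm : e ∈ m.erase a ↔ e ∈ m := by
          rw [hm.erase_eq_filter a]
          simp [hea]
        simp only [List.contains_eq_mem]
        simp [hmm]
      · rw [hm.erase_eq_filter a, List.filter_filter]
        apply List.filter_congr
        intro e _
        simp only [List.contains_cons]
        by_cases hea : e = a
        · simp [hea]
        · simp [bne, Bool.and_comm]
    · have hc : m.contains a = false := by simpa [List.contains_eq_mem] using hma
      rw [List.foldl_cons]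
      simp only [hc, Bool.not_false, if_true]
      rw [ih m (res ++ [a]) ht hm]
      simp only [Prod.mk.injEq]
      refine ⟨?_, ?_⟩
      · rw [List.filter_cons]
        rw [if_pos (by simp [hma])]
        simp
      · apply List.filter_congr
        intro e he
        have hea : a ≠ e := fun h => hma (h ▸ he)
        simp only [List.contains_cons]
        have h2 : (e == a) = false := by simp [Ne.symm hea]
        simp only [h2, Bool.false_or]

-- the Int-valued counter test equals the Nat count test
theorem pv_beq_cast (n : Nat) : ((n : Int) == (1 : Int)) = (n == (1 : Nat)) := by
  by_cases h : n = 1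
  · subst h; rfl
  · have h1 : ((n : Int) == (1 : Int)) = false := by
      rw [beq_eq_false_iff_ne]
      intro hh
      exact h (by exact_mod_cast hh)
    have h2 : (n == (1 : Nat)) = false := by
      rw [beq_eq_false_iff_ne]
      exact h
    rw [h1, h2]

-- a set built from a duplicate-free-by-construction filter tests membership like the list
theorem pv_set_contains (xs : List Int) (e : Int) :
    List.contains (PySem.Set.ofList xs) e = List.contains xs e := by
  rw [Bool.eq_iff_iff]
  simp [List.contains_eq_mem, PySem.Set.mem_ofList]

theorem unique_el_eq (lst1 lst2 : List Int) :
    unique_el lst1 lst2 = unique_el_alt lst1 lst2 := by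
  unfold unique_el unique_el_alt
  simp only [PySem.Dict.foldl_insert_getD_add_one_eq_counter, PySem.Dict.getD_counter,
    PySem.Set.contains_eq_listContains]
  rw [pv_foldA _ _ _ (pv_nodup_once lst1) (pv_nodup_once lst2)]
  simp only [pv_beq_cast, pv_set_contains, ← PySem.List.count_eq]
  congr 1
  · rw [List.filter_filter]
    apply List.filter_congr
    intro e _
    exact Bool.and_comm _ _
  · rw [List.filter_filter]
    apply List.filter_congr
    intro e _
    exact Bool.and_comm _ _

-- ===== VERDICT (by name: the statement is the Claim_ definition above) =====
theorem unique_el_spec : Claim_equal_unique_el := by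
  intro lst1 lst2 _
  unfold Spec_unique_el
  exact unique_el_eq lst1 lst2
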